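-- pv_equiv track=rewrite | github.com/mochilang/mochi | tests/leetcode/x/python/0411.py | build_abbr
-- ===== SOURCE A (Python) =====
-- def build_abbr(target: str, mask: int) -> str:
--     out: list[str] = []
--     run = 0
--     for i, ch in enumerate(target):
--         if (mask >> i) & 1:
--             if run:
--                 out.append(str(run))
--                 run = 0
--             out.append(ch)
--         else:
--             run += 1
--     if run:
--         out.append(str(run))
--     return ''.join(out)
-- ===== SOURCE B (Python) =====
-- def build_abbr(target: str, mask: int) -> str:
--     pieces: list[str] = []
--     i, n = 0, len(target)
--     while i < n:
--         if (mask >> i) & 1: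
--             pieces.append(target[i])
--             i += 1
--         else:
--             j = i + 1
--             while j < n and not ((mask >> j) & 1):
--                 j += 1
--             pieces.append(str(j - i))
--             i = j
--     return ''.join(pieces)
-- ===== Notes on version B (the rewrite author's own statement) =====
-- stated objective: alternative
-- what changed: B replaces A's run-counter-with-deferred-flush (increment a counter per kept-out char, flush it before each kept char and once after the loop) by segment grouping: at each position it either emits the kept character or scans forward to the end of the current masked-out run and emits its length immediately, so no pending-run state or final flush exists.
import Mathlib
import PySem

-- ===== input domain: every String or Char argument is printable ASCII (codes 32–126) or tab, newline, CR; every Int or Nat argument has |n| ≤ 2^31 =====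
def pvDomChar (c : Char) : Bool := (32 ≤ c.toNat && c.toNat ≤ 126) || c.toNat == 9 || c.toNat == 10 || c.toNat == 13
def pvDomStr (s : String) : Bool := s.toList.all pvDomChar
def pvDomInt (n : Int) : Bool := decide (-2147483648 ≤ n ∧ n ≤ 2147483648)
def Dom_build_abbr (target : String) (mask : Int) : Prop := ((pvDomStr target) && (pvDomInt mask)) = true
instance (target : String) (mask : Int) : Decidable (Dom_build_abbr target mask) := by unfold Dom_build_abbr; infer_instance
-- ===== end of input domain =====

-- B replaces A's run-counter-and-flush loop by direct segment grouping (scan each masked-out run and emit its length at once); alternative decomposition, same cost.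


-- ===== PORT A =====
-- `(mask >> i) & 1` as a truth test: shifting is floor-division by 2^i, `& 1` is Python `% 2`; exact for all mask (i is a loop index, hence ≥ 0)
def pvBit (mask : Int) (i : Nat) : Bool := PySem.Int.mod (PySem.Int.floordiv mask ((2 : Int) ^ i)) 2 != 0

-- the `for i, ch in enumerate(target)` loop, state (out, run)
def pvLoopA (mask : Int) : List Char → Nat → (List String × Nat) → (List String × Nat)
  | [], _, s => s
  | ch :: rest, i, (out, run) =>
    if pvBit mask i then
      pvLoopA mask rest (i + 1) ((if run ≠ 0 then out ++ [PySem.Int.toStr (run : Int)] else out) ++ [ch.toString], 0)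
    else
      pvLoopA mask rest (i + 1) (out, run + 1)

def build_abbr (target : String) (mask : Int) : String :=
  let s := pvLoopA mask target.toList 0 ([], 0)
  PySem.Str.join "" (if s.2 ≠ 0 then s.1 ++ [PySem.Int.toStr (s.2 : Int)] else s.1)

-- ===== PORT B =====
-- the inner `while j < n and not ((mask >> j) & 1)` scan: returns (number of chars skipped, remaining chars)
def pvSkip (mask : Int) : Nat → List Char → Nat × List Char
  | _, [] => (0, [])
  | i, ch :: rest =>
    if pvBit mask i then (0, ch :: rest)
    else
      let p := pvSkip mask (i + 1) rest
      (p.1 + 1, p.2)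

theorem pvSkip_len_le (mask : Int) (i : Nat) (l : List Char) : (pvSkip mask i l).2.length ≤ l.length := by
  induction l generalizing i with
  | nil => simp [pvSkip]
  | cons ch rest ih =>
    simp only [pvSkip]
    split
    · simp
    · exact le_trans (ih (i + 1)) (by simp)

-- the outer `while i < n` loop over the remaining characters at index i
def pvPieces (mask : Int) : Nat → List Char → List String
  | _, [] => []
  | i, ch :: rest =>
    if pvBit mask i then ch.toString :: pvPieces mask (i + 1) rest
    else
      let p := pvSkip mask (i + 1) rest
      PySem.Int.toStr ((p.1 + 1 : Nat) : Int) :: pvPieces mask (i + p.1 + 1) p.2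
termination_by _ l => l.length
decreasing_by
  · simp
  · exact Nat.lt_succ_of_le (pvSkip_len_le mask (i + 1) rest)

def build_abbr_alt (target : String) (mask : Int) : String :=
  PySem.Str.join "" (pvPieces mask 0 target.toList)

-- ===== PRECONDITION & SPEC =====
def Spec_build_abbr (target : String) (mask : Int) (out : String) : Prop := out = build_abbr_alt target mask
instance (target : String) (mask : Int) (out : String) : Decidable (Spec_build_abbr target mask out) := by unfold Spec_build_abbr; infer_instance

-- ===== CLAIM (what is proved, stated in full; the proofs are below) =====
def Claim_equal_build_abbr : Prop := ∀ (target : String) (mask : Int), Dom_build_abbr target mask → Spec_build_abbr target mask (build_abbr target mask)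

-- ===== LEMMAS AND PROOFS =====

-- A's loop re-expressed without the output accumulator: the pieces still to be emitted from index i with pending run `run`
def pvH (mask : Int) : Nat → Nat → List Char → List String
  | _, run, [] => if run ≠ 0 then [PySem.Int.toStr (run : Int)] else []
  | i, run, ch :: rest =>
    if pvBit mask i then
      (if run ≠ 0 then [PySem.Int.toStr (run : Int)] else []) ++ ch.toString :: pvH mask (i + 1) 0 rest
    else
      pvH mask (i + 1) (run + 1) rest

theorem pvLoopA_eq_pvH (mask : Int) (l : List Char) (i : Nat) (out : List String) (run : Nat) :
    (if (pvLoopA mask l i (out, run)).2 ≠ 0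
      then (pvLoopA mask l i (out, run)).1 ++ [PySem.Int.toStr ((pvLoopA mask l i (out, run)).2 : Int)]
      else (pvLoopA mask l i (out, run)).1)
    = out ++ pvH mask i run l := by
  induction l generalizing i out run with
  | nil => simp only [pvLoopA, pvH]; split <;> simp
  | cons ch rest ih =>
    simp only [pvLoopA, pvH]
    by_cases hb : pvBit mask i
    · simp only [hb, if_pos]
      rw [ih]
      by_cases hr : run ≠ 0 <;> simp [hr]
    · simp only [hb]
      exact ih (i + 1) out (run + 1)

theorem pvH_eq_pvPieces (mask : Int) (l : List Char) (i : Nat) (run : Nat) :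
    pvH mask i run l =
      if run = 0 then pvPieces mask i l
      else PySem.Int.toStr ((run + (pvSkip mask i l).1 : Nat) : Int) ::
           pvPieces mask (i + (pvSkip mask i l).1) (pvSkip mask i l).2 := by
  induction l generalizing i run with
  | nil =>
    simp only [pvH, pvSkip, pvPieces]
    by_cases hr : run = 0 <;> simp [hr]
  | cons ch rest ih =>
    simp only [pvH, pvSkip]
    by_cases hb : pvBit mask i
    · simp only [hb]
      rw [ih (i + 1) 0]
      by_cases hr : run = 0
      · simp [hr, pvPieces, hb]
      · simp only [hr, ite_false]
        have : pvPieces mask i (ch :: rest) = ch.toString :: pvPieces mask (i + 1) rest := by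
          simp [pvPieces, hb]
        simp [hr, this]
    · simp only [hb, Bool.false_eq_true, ite_false]
      rw [ih (i + 1) (run + 1)]
      simp only [Nat.succ_ne_zero, ite_false]
      by_cases hr : run = 0
      · have hpp : pvPieces mask i (ch :: rest)
            = PySem.Int.toStr (((pvSkip mask (i + 1) rest).1 + 1 : Nat) : Int) ::
              pvPieces mask (i + (pvSkip mask (i + 1) rest).1 + 1) (pvSkip mask (i + 1) rest).2 := by
          simp [pvPieces, hb]
        simp only [hr, ite_true, hpp]
        refine congrArg₂ List.cons ?_ ?_
        · congr 1; omega
        · congr 1; omega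
      · simp only [hr, ite_false]
        refine congrArg₂ List.cons ?_ ?_
        · congr 1; omega
        · congr 1; omega

-- ===== VERDICT (by name: the statement is the Claim_ definition above) =====
theorem build_abbr_spec : Claim_equal_build_abbr := by
  intro target mask _
  unfold Spec_build_abbr build_abbr build_abbr_alt
  have h := pvLoopA_eq_pvH mask target.toList 0 [] 0
  rw [pvH_eq_pvPieces] at h
  simp only [ite_true, List.nil_append] at h
  simp only [h]
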